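-- pv_equiv track=rewrite | github.com/Celonis-Garage/Process-Simulation-Unseen-Variant | backend/usd_builder.py | assign_users_to_events
-- ===== SOURCE A (Python) =====
-- from typing import Dict, List, Any, Tuple
--
-- def assign_users_to_events(events: List[Dict[str, Any]], available_users: List[str]) -> Dict[str, str]:
--     """
--     Assign users to events based on event functionality/station.
--     Maps specific event types to appropriate users based on typical O2C roles.
--
--     Returns a dictionary mapping event names to user IDs.
--     """
--     # Define event-to-role mapping based on typical O2C process functions
--     event_role_mapping = {
--         'Receive Customer Order': 'reception',  # Customer service/sales
--         'Validate Customer Order': 'validation',  # Order processor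
--         'Perform Credit Check': 'finance',  # Finance team
--         'Approve Order': 'manager',  # Management
--         'Reject Order': 'manager',  # Management decision
--         'Schedule Order Fulfillment': 'planning',  # Supply chain planner
--         'Generate Pick List': 'warehouse',  # Warehouse staff
--         'Pack Items': 'warehouse',  # Packing/warehouse
--         'Generate Shipping Label': 'shipping',  # Shipping coordinator
--         'Ship Order': 'shipping',  # Shipping team
--         'Generate Invoice': 'accounting',  # Billing/accounting
--         'Receive Payment': 'accounting',  # Accounts receivable
--         'Apply Discount': 'sales',  # Sales/marketing
--         'Process Return Request': 'customer_service',  # Customer service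
--         'Cancel Order': 'manager',  # Management decision
--         'Close Order': 'accounting'  # Final accounting
--     }
--
--     # Create consistent role-to-user mapping
--     role_to_user = {}
--     event_to_user = {}
--
--     for event in events:
--         event_name = event.get('event_name', event.get('name', ''))
--         role = event_role_mapping.get(event_name, 'generic')
--
--         # Assign user to role consistently (same role always gets same user)
--         if role not in role_to_user:
--             role_to_user[role] = available_users[len(role_to_user) % len(available_users)] if available_users else 'System'
--
--         event_to_user[event_name] = role_to_user[role]
--
--     return event_to_user
-- ===== SOURCE B (Python) =====
-- def assign_users_to_events(events, available_users):
--     """Rank-based version: each event's user is computed directly from the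
--     number of distinct roles appearing before its role's first occurrence
--     (no incremental role->user table is maintained)."""
--     event_role_mapping = {
--         'Receive Customer Order': 'reception',
--         'Validate Customer Order': 'validation',
--         'Perform Credit Check': 'finance',
--         'Approve Order': 'manager',
--         'Reject Order': 'manager',
--         'Schedule Order Fulfillment': 'planning',
--         'Generate Pick List': 'warehouse',
--         'Pack Items': 'warehouse',
--         'Generate Shipping Label': 'shipping',
--         'Ship Order': 'shipping',
--         'Generate Invoice': 'accounting',
--         'Receive Payment': 'accounting',
--         'Apply Discount': 'sales',
--         'Process Return Request': 'customer_service',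
--         'Cancel Order': 'manager',
--         'Close Order': 'accounting',
--     }
--
--     names = [e.get('event_name', e.get('name', '')) for e in events]
--     roles = [event_role_mapping.get(nm, 'generic') for nm in names]
--     n = len(available_users)
--
--     def user_for(role):
--         # rank of a role = number of distinct roles strictly before its
--         # first occurrence; role `rank` gets user rank % n (round-robin).
--         rank = len(set(roles[:roles.index(role)]))
--         return available_users[rank % n] if n else 'System'
--
--     return {nm: user_for(r) for nm, r in zip(names, roles)}
-- ===== Notes on version B (the rewrite author's own statement) =====
-- stated objective: alternative
-- what changed: Drops A's incrementally maintained role->user and event_to_user dicts entirely: B precomputes the name and role lists, and computes each event's user directly by a closed-form rank (the number of distinct roles before its role's first occurrence, via roles.index and a set of the prefix) instead of growing a table during the loop.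
import Mathlib
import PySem

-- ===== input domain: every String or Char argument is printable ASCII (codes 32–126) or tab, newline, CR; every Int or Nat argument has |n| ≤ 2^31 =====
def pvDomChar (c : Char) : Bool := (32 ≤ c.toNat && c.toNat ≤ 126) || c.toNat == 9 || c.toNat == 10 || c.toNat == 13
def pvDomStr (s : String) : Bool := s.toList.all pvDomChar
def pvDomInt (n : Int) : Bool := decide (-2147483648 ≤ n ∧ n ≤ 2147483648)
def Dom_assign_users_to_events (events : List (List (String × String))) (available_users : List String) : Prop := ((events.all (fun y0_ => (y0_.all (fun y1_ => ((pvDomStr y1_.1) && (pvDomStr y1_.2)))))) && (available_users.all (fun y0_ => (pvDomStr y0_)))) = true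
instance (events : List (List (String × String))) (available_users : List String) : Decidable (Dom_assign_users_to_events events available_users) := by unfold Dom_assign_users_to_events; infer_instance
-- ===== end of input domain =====

-- B maintains no role->user table at all: it computes each event's user from a
-- closed-form rank (number of distinct roles before its role's first
-- occurrence); objective: alternative.

-- ===== PORT A =====
-- the literal event_role_mapping dict (identical in both Pythons)
def pvRoleMap : PySem.Dict String String := PySem.Dict.ofList [
  ("Receive Customer Order", "reception"),
  ("Validate Customer Order", "validation"),
  ("Perform Credit Check", "finance"),
  ("Approve Order", "manager"),
  ("Reject Order", "manager"),
  ("Schedule Order Fulfillment", "planning"),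
  ("Generate Pick List", "warehouse"),
  ("Pack Items", "warehouse"),
  ("Generate Shipping Label", "shipping"),
  ("Ship Order", "shipping"),
  ("Generate Invoice", "accounting"),
  ("Receive Payment", "accounting"),
  ("Apply Discount", "sales"),
  ("Process Return Request", "customer_service"),
  ("Cancel Order", "manager"),
  ("Close Order", "accounting")]

-- event.get('event_name', event.get('name', '')) — identical expression in both Pythons
def pvEventName (event : List (String × String)) : String :=
  ((PySem.Dict.mk event).get? "event_name").getD (((PySem.Dict.mk event).get? "name").getD "")

-- event_role_mapping.get(event_name, 'generic')
def pvRole (name : String) : String := pvRoleMap.getD name "generic"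

-- A: one loop building role_to_user and event_to_user together.
-- available_users[k] is in range when taken (k = size % length, list nonempty): pyGetD with dummy default is exact.
-- role_to_user[role] is a present key right after the conditional insert: getD with dummy default is exact.
def assign_users_to_events (events : List (List (String × String))) (available_users : List String) : List (String × String) :=
  let st := events.foldl
    (fun (st : PySem.Dict String String × PySem.Dict String String) event =>
      let event_name := pvEventName event
      let role := pvRole event_name
      let rtu :=
        if st.1.contains role then st.1
        else st.1.insert role
          (if available_users.isEmpty then "System"
           else PySem.List.pyGetD available_users
             (PySem.Int.mod (st.1.size : Int) (available_users.length : Int)) "")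
      (rtu, st.2.insert event_name (rtu.getD role "")))
    (PySem.Dict.empty, PySem.Dict.empty)
  st.2.items

-- ===== PORT B =====
-- B: names and roles are precomputed lists; each event's user comes from the
-- rank len(set(roles[:roles.index(role)])).  roles.index(role) always succeeds
-- (role is drawn from roles), so '.getD 0' is exact; roles[:k] with k ≥ 0 is
-- PySem.List.slice with bounds none/k; available_users[rank % n] is in range
-- when n ≠ 0, so pyGetD with a dummy default is exact.
def assign_users_to_events_alt (events : List (List (String × String))) (available_users : List String) : List (String × String) :=
  let names := events.map pvEventName
  let roles := names.map pvRole
  let n := available_users.length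
  let user_for := fun (role : String) =>
    let rank := PySem.Set.len (PySem.Set.ofList
      (PySem.List.slice roles none (some (((PySem.List.index? roles role).getD 0 : Nat) : Int))))
    if n ≠ 0 then PySem.List.pyGetD available_users (PySem.Int.mod (rank : Int) (n : Int)) ""
    else "System"
  ((names.zip roles).foldl
    (fun d p => d.insert p.1 (user_for p.2)) PySem.Dict.empty).items

-- ===== PRECONDITION & SPEC =====
def Spec_assign_users_to_events (events : List (List (String × String))) (available_users : List String) (out : List (String × String)) : Prop := out = assign_users_to_events_alt events available_users
instance (events : List (List (String × String))) (available_users : List String) (out : List (String × String)) : Decidable (Spec_assign_users_to_events events available_users out) := by unfold Spec_assign_users_to_events; infer_instance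

-- ===== CLAIM (what is proved, stated in full; the proofs are below) =====
def Claim_equal_assign_users_to_events : Prop := ∀ (events : List (List (String × String))) (available_users : List String), Dom_assign_users_to_events events available_users → Spec_assign_users_to_events events available_users (assign_users_to_events events available_users)

-- ===== LEMMAS AND PROOFS =====

-- the user assigned to the role created at position k
def pvUval (users : List String) (k : Int) : String :=
  if users.length = 0 then "System"
  else PySem.List.pyGetD users (PySem.Int.mod k (users.length : Int)) ""

-- A's role_to_user update, abstracted
def pvStepR (users : List String) (rtu : PySem.Dict String String)
    (event : List (String × String)) : PySem.Dict String String :=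
  if rtu.contains (pvRole (pvEventName event)) then rtu
  else rtu.insert (pvRole (pvEventName event)) (pvUval users (rtu.size : Int))

-- A's whole loop body, abstracted (let-free form of the port's lambda)
def pvStepA (users : List String)
    (st : PySem.Dict String String × PySem.Dict String String)
    (event : List (String × String)) :
    PySem.Dict String String × PySem.Dict String String :=
  (pvStepR users st.1 event,
   st.2.insert (pvEventName event)
     ((pvStepR users st.1 event).getD (pvRole (pvEventName event)) ""))

-- the role table determined by a distinct-roles list
def pvT (users : List String) (ds : List String) : PySem.Dict String String :=
  PySem.Dict.mk ((PySem.List.enumerate ds 0).map (fun p => (p.2, pvUval users p.1)))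

theorem pvT_keys (users ds) : (pvT users ds).keys = ds := by
  simp [pvT, PySem.Dict.keys, List.map_map, Function.comp_def, PySem.List.map_snd_enumerate]

theorem pvT_size (users ds) : (pvT users ds).size = ds.length := by
  simp [pvT, PySem.Dict.size, PySem.List.length_enumerate]

theorem pvT_contains (users ds r) :
    (pvT users ds).contains r = decide (r ∈ ds) := by
  rw [PySem.Dict.contains_eq_decide_mem_keys, pvT_keys]

theorem pv_enum_append {α : Type} (ds : List α) (r : α) (s : Int) :
    PySem.List.enumerate (ds ++ [r]) s
      = PySem.List.enumerate ds s ++ [((s + ds.length : Int), r)] := by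
  induction ds generalizing s with
  | nil => simp [PySem.List.enumerate_cons, PySem.List.enumerate_nil]
  | cons x xs ih =>
      simp [PySem.List.enumerate_cons, ih (s + 1)]
      ring_nf

theorem pvT_append (users ds r) (h : r ∉ ds) :
    pvT users (ds ++ [r]) = (pvT users ds).insert r (pvUval users (ds.length : Int)) := by
  apply PySem.Dict.ext
  have hc : (pvT users ds).contains r = false := by simp [pvT_contains, h]
  rw [PySem.Dict.items_insert_of_not_contains _ _ hc]
  simp [pvT, pv_enum_append]

-- A's rtu fold, started at a table, is the table of the Set.add fold
theorem pv_foldR_T (users : List String) (l : List (List (String × String)))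
    (ds : List String) (h : ds.Nodup) :
    l.foldl (pvStepR users) (pvT users ds)
      = pvT users (l.foldl (fun acc e => PySem.Set.add acc (pvRole (pvEventName e))) ds) := by
  induction l generalizing ds with
  | nil => rfl
  | cons e l ih =>
      simp only [List.foldl_cons]
      by_cases hm : pvRole (pvEventName e) ∈ ds
      · rw [show pvStepR users (pvT users ds) e = pvT users ds by
              simp [pvStepR, pvT_contains, hm],
            show PySem.Set.add ds (pvRole (pvEventName e)) = ds by
              simp [PySem.Set.add, PySem.Set.contains, hm]]
        exact ih ds h
      · rw [show pvStepR users (pvT users ds) e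
              = pvT users (ds ++ [pvRole (pvEventName e)]) by
              rw [pvT_append users ds _ hm]
              simp [pvStepR, pvT_contains, hm, pvT_size],
            show PySem.Set.add ds (pvRole (pvEventName e)) = ds ++ [pvRole (pvEventName e)] by
              simp [PySem.Set.add, PySem.Set.contains, hm]]
        exact ih _ (List.Nodup.append h (List.nodup_singleton _)
          (by simpa [List.disjoint_singleton] using hm))

-- once a role has a user, later steps never change it
theorem pv_stable (users : List String) (l : List (List (String × String)))
    (rtu : PySem.Dict String String) (r : String) (u : String)
    (h : rtu.get? r = some u) : (l.foldl (pvStepR users) rtu).get? r = some u := by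
  induction l generalizing rtu with
  | nil => simpa using h
  | cons e l ih =>
      simp only [List.foldl_cons]
      apply ih
      unfold pvStepR
      split_ifs with hc
      · exact h
      · have hne : r ≠ pvRole (pvEventName e) := by
          intro heq
          rw [PySem.Dict.contains_eq_isSome_get?, ← heq, h] at hc
          simp at hc
        rw [PySem.Dict.get?_insert_of_ne _ _ hne]
        exact h

-- right after a step, the step's role is bound (to the value the step reads back)
theorem pv_step_some (users : List String) (rtu : PySem.Dict String String)
    (e : List (String × String)) :
    (pvStepR users rtu e).get? (pvRole (pvEventName e))
      = some ((pvStepR users rtu e).getD (pvRole (pvEventName e)) "") := by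
  unfold pvStepR
  split_ifs with hc
  · rw [PySem.Dict.contains_eq_isSome_get?] at hc
    cases hg : rtu.get? (pvRole (pvEventName e)) with
    | none => rw [hg] at hc; simp at hc
    | some v => simp [PySem.Dict.getD_eq_get?_getD, hg]
  · simp [PySem.Dict.get?_insert_self, PySem.Dict.getD_eq_get?_getD]

-- A's event_to_user fold equals the fold that looks everything up in the FINAL table
theorem pv_etu (users : List String) (l : List (List (String × String)))
    (rtu etu : PySem.Dict String String) :
    (l.foldl (pvStepA users) (rtu, etu)).2
    = l.foldl
        (fun d event =>
          d.insert (pvEventName event)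
            ((l.foldl (pvStepR users) rtu).getD (pvRole (pvEventName event)) "")) etu := by
  induction l generalizing rtu etu with
  | nil => rfl
  | cons e l ih =>
      simp only [List.foldl_cons]
      have hA : pvStepA users (rtu, etu) e
          = (pvStepR users rtu e,
             etu.insert (pvEventName e)
               ((pvStepR users rtu e).getD (pvRole (pvEventName e)) "")) := rfl
      rw [hA, ih]
      have hfin := pv_stable users l (pvStepR users rtu e) _ _ (pv_step_some users rtu e)
      rw [show (l.foldl (pvStepR users) (pvStepR users rtu e)).getD
            (pvRole (pvEventName e)) ""
          = (pvStepR users rtu e).getD (pvRole (pvEventName e)) "" by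
        rw [PySem.Dict.getD_eq_get?_getD, hfin]; rfl]

-- the value expression A writes is pvUval
theorem pv_uvalA (users : List String) (k : Nat) :
    (if users.isEmpty then "System"
     else PySem.List.pyGetD users (PySem.Int.mod (k : Int) (users.length : Int)) "")
    = pvUval users (k : Int) := by
  cases users <;> simp [pvUval]

-- the value expression B writes is pvUval
theorem pv_uvalB (users : List String) (k : Int) :
    (if users.length ≠ 0
     then PySem.List.pyGetD users (PySem.Int.mod k (users.length : Int)) ""
     else "System")
    = pvUval users k := by
  unfold pvUval
  by_cases h : users.length = 0 <;> simp [h]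

-- appending via Set.add never moves an element already present
theorem pv_index_foldl_add (suf : List String) (acc : List String) (r : String)
    (h : r ∈ acc) :
    PySem.List.index? (suf.foldl PySem.Set.add acc) r = PySem.List.index? acc r := by
  induction suf generalizing acc with
  | nil => rfl
  | cons x suf ih =>
      simp only [List.foldl_cons]
      rw [ih _ (by simp [PySem.Set.mem_add, h])]
      unfold PySem.Set.add
      split
      · rfl
      · exact PySem.List.index?_append_of_mem _ h

-- the rank B computes is the position of r in the deduplicated roles list
theorem pv_rank_eq (roles : List String) (r : String) (k : Nat)
    (hk : PySem.List.index? roles r = some k) :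
    PySem.List.index? (roles.foldl PySem.Set.add []) r
      = some ((PySem.Set.ofList (roles.take k)).length) := by
  obtain ⟨pre, suf, hsplit, hlen, hpre⟩ := (PySem.List.index?_eq_some_iff _ _ _).mp hk
  subst hsplit
  rw [List.take_left' hlen]
  rw [List.foldl_append, List.foldl_cons]
  have hnotin : r ∉ pre.foldl PySem.Set.add [] := by
    rw [← PySem.Set.ofList_eq_foldl]
    simpa [← PySem.List.dedup_eq_ofList, PySem.List.mem_dedup] using hpre
  have hadd : PySem.Set.add (pre.foldl PySem.Set.add []) r
      = pre.foldl PySem.Set.add [] ++ [r] := by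
    simp [PySem.Set.add, PySem.Set.contains, hnotin]
  rw [hadd, pv_index_foldl_add _ _ _ (by simp),
      PySem.List.index?_append_singleton_self _ _ hnotin,
      ← PySem.Set.ofList_eq_foldl]

-- looking r up in the table pvT users ds reads the user of r's position in ds
theorem pvT_get_aux (users : List String) (ds : List String) (s : Int) (j : Nat)
    (hj : j < ds.length)
    (hfirst : ∀ i, i < j → ∀ (hlen : i < ds.length), ds[i] ≠ ds[j]) :
    (PySem.Dict.mk ((PySem.List.enumerate ds s).map
        (fun p => (p.2, pvUval users p.1)))).get? ds[j]
      = some (pvUval users (s + j)) := by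
  induction ds generalizing s j with
  | nil => simp at hj
  | cons d ds ih =>
      rw [PySem.List.enumerate_cons, List.map_cons, PySem.Dict.get?_mk_cons]
      cases j with
      | zero => simp
      | succ j =>
          simp only [List.getElem_cons_succ]
          have hjlt : j < ds.length := by simpa using hj
          have hd : d ≠ ds[j] := by
            have := hfirst 0 (Nat.succ_pos j) (by simp)
            simpa using this
          rw [if_neg (by simpa using hd)]
          rw [show s + ((j + 1 : Nat) : Int) = (s + 1) + (j : Int) by push_cast; ring]
          exact ih (s + 1) j hjlt
            (fun i hi hlen => by simpa using hfirst (i + 1) (by omega) (by simpa using hlen))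

theorem pvT_getD_of_index? (users : List String) (ds : List String) (r : String)
    (j : Nat) (hj : PySem.List.index? ds r = some j) :
    (pvT users ds).getD r "" = pvUval users (j : Int) := by
  obtain ⟨hlt, hget, hfirst⟩ := PySem.List.getElem_of_index?_eq_some hj
  have haux := pvT_get_aux users ds 0 j hlt
    (fun i hi hlen => by
      rw [hget]
      exact hfirst i hi)
  rw [hget] at haux
  rw [PySem.Dict.getD_eq_get?_getD, pvT, haux]
  simp

-- ===== VERDICT (by name: the statement is the Claim_ definition above) =====
theorem assign_users_to_events_spec : Claim_equal_assign_users_to_events := by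
  intro events users _
  unfold Spec_assign_users_to_events assign_users_to_events assign_users_to_events_alt
  -- A's loop body is pvStepA
  have hstep : (fun (st : PySem.Dict String String × PySem.Dict String String) event =>
      let event_name := pvEventName event
      let role := pvRole event_name
      let rtu :=
        if st.1.contains role then st.1
        else st.1.insert role
          (if users.isEmpty then "System"
           else PySem.List.pyGetD users
             (PySem.Int.mod (st.1.size : Int) (users.length : Int)) "")
      (rtu, st.2.insert event_name (rtu.getD role ""))) = pvStepA users := by
    funext st e
    simp only [pvStepA, pvStepR, pv_uvalA]
  rw [hstep]
  simp only []
  -- the roles list and its dedup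
  have hroles : (events.map pvEventName).map pvRole
      = events.map (fun e => pvRole (pvEventName e)) := by
    rw [List.map_map]; rfl
  set roles := events.map (fun e => pvRole (pvEventName e)) with hrolesdef
  set ds := roles.foldl PySem.Set.add [] with hds
  -- A's final rtu is the table of ds
  have hrtu : events.foldl (pvStepR users) PySem.Dict.empty = pvT users ds := by
    have h0 : (PySem.Dict.empty : PySem.Dict String String) = pvT users [] := rfl
    rw [h0, pv_foldR_T users events [] List.nodup_nil, hds, hrolesdef, List.foldl_map]
  rw [pv_etu users events PySem.Dict.empty PySem.Dict.empty, hrtu]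
  -- B's fold over zip(names, roles) is a fold over events
  rw [hroles, List.zip_map', List.foldl_map]
  congr 1
  apply PySem.List.foldl_congr_mem
  intro d e he
  simp only []
  -- pointwise equality of the inserted values, for events in the list
  have hmem : pvRole (pvEventName e) ∈ roles := by
    rw [hrolesdef]
    exact List.mem_map_of_mem he
  obtain ⟨k, hk⟩ := Option.isSome_iff_exists.mp
    ((PySem.List.index?_isSome_iff _ _).mpr hmem)
  have hrank := pv_rank_eq roles (pvRole (pvEventName e)) k hk
  rw [← hds] at hrank
  rw [hrolesdef] at hk
  rw [← hrolesdef] at hk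
  rw [hk, Option.getD_some, PySem.List.slice_to_natCast,
      pvT_getD_of_index? users ds _ _ hrank, pv_uvalB]
  rfl
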